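-- pv_equiv track=rewrite | github.com/manuel1410/Futoshiki | Futoshiki.py | unir_tiempos
-- ===== SOURCE A (Python) =====
-- def unir_tiempos(marcas, i):
--     #itera las marcas
--     if marcas == []:
--         return ''
--     elif i >= len(marcas):
--         return ''
--     else:
--         h = marcas[i][1]
--         m = marcas[i][2]
--         s = marcas[i][3]
--         if 0 <= h <= 9:
--             h = '0' + str(h)
--         else:
--             h = str(h)
--
--         if 0 <= m <= 9:
--             m = '0' + str(m)
--         else:
--             m = str(m)
--
--         if 0 <= s <= 9:
--             s = '0' + str(s)
--         else:
--             s = str(s)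
--
--         tiempo = h + ':' + m + ':' + s
--         return tiempo + '\n' + unir_tiempos(marcas, i+1)
-- ===== SOURCE B (Python) =====
-- def unir_tiempos(marcas, i):
--     def pad(x):
--         return '0' + str(x) if 0 <= x <= 9 else str(x)
--     if not marcas:
--         return ''
--     piezas = []
--     for j in range(i, len(marcas)):
--         m = marcas[j]
--         piezas.append(pad(m[1]) + ':' + pad(m[2]) + ':' + pad(m[3]) + '\n')
--     return ''.join(piezas)
-- ===== Notes on version B (the rewrite author's own statement) =====
-- stated objective: idiomatic
-- what changed: Replaces A's recursion (string built by repeated concatenation down the call stack, one base-case test per call) by a flat for-loop over range(i, len(marcas)) that collects the pieces in a list and joins them once, with a shared pad helper instead of three copies of the padding branch.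
import Mathlib
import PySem

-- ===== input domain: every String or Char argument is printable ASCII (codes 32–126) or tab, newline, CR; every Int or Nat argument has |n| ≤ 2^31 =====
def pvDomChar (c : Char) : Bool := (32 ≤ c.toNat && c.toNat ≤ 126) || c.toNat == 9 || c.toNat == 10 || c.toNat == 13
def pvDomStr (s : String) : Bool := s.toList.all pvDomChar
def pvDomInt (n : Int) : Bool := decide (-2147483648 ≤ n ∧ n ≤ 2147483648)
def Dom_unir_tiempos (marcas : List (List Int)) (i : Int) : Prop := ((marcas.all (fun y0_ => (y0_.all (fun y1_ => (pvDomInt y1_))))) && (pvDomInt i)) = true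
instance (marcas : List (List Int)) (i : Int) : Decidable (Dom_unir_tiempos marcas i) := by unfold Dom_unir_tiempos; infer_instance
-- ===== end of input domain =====

-- B replaces A's recursion by a flat loop over range(i, len(marcas)) collecting pieces joined once,
-- with one shared pad helper (idiomatic; same return value everywhere).

-- ===== PORT A =====
-- literal transliteration of A's recursion; the pyGet?-defaults are only reached outside Pre_
def unir_tiempos (marcas : List (List Int)) (i : Int) : String :=
  if marcas = [] then ""
  else if (PySem.List.len marcas) ≤ i then ""
  else
    let row := (PySem.List.pyGet? marcas i).getD []
    let h := (PySem.List.pyGet? row 1).getD 0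
    let m := (PySem.List.pyGet? row 2).getD 0
    let s := (PySem.List.pyGet? row 3).getD 0
    let hs := if 0 ≤ h ∧ h ≤ 9 then "0" ++ PySem.Int.toStr h else PySem.Int.toStr h
    let ms := if 0 ≤ m ∧ m ≤ 9 then "0" ++ PySem.Int.toStr m else PySem.Int.toStr m
    let ss := if 0 ≤ s ∧ s ≤ 9 then "0" ++ PySem.Int.toStr s else PySem.Int.toStr s
    let tiempo := hs ++ ":" ++ ms ++ ":" ++ ss
    tiempo ++ "\n" ++ unir_tiempos marcas (i + 1)
termination_by (PySem.List.len marcas - i).toNat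
decreasing_by simp only [PySem.List.len_eq] at *; omega

-- ===== PORT B =====
-- pad(x) of Source B
def pvPad (x : Int) : String :=
  if 0 ≤ x ∧ x ≤ 9 then "0" ++ PySem.Int.toStr x else PySem.Int.toStr x

-- the piece appended for row m = marcas[j] (getD defaults only reached outside Pre_)
def pvRow (m : List Int) : String :=
  pvPad ((PySem.List.pyGet? m 1).getD 0) ++ ":" ++
  pvPad ((PySem.List.pyGet? m 2).getD 0) ++ ":" ++
  pvPad ((PySem.List.pyGet? m 3).getD 0) ++ "\n"

-- Source B: guard, then ''.join of the pieces collected over range(i, len(marcas))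
def unir_tiempos_alt (marcas : List (List Int)) (i : Int) : String :=
  if marcas = [] then ""
  else
    PySem.Str.join ""
      ((PySem.List.pyRange i (PySem.List.len marcas)).map
        (fun j => pvRow ((PySem.List.pyGet? marcas j).getD [])))

-- ===== PRECONDITION & SPEC =====
-- Pre_ = exactly where the Python A (and B) returns instead of raising IndexError: trivially
-- (empty list / i past the end), or every visited row has the four fields marcas[j][1..3]
-- (rows from i on for 0 ≤ i; via negative-index wraparound all rows when -len ≤ i < 0;
-- i < -len on a nonempty list raises at once and is excluded).
def Pre_unir_tiempos (marcas : List (List Int)) (i : Int) : Prop :=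
  marcas = [] ∨ (marcas.length : Int) ≤ i ∨
  (0 ≤ i ∧ ∀ l ∈ marcas.drop i.toNat, 4 ≤ l.length) ∨
  (-(marcas.length : Int) ≤ i ∧ i < 0 ∧ ∀ l ∈ marcas, 4 ≤ l.length)
instance (marcas : List (List Int)) (i : Int) : Decidable (Pre_unir_tiempos marcas i) := by unfold Pre_unir_tiempos; infer_instance

def pvWitness_unir_tiempos : List (List Int) × Int := ([[0, 1, 2, 3], [0, 10, -5, 0]], 0)

def Spec_unir_tiempos (marcas : List (List Int)) (i : Int) (out : String) : Prop := out = unir_tiempos_alt marcas i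
instance (marcas : List (List Int)) (i : Int) (out : String) : Decidable (Spec_unir_tiempos marcas i out) := by unfold Spec_unir_tiempos; infer_instance

-- ===== CLAIM =====
def Claim_equal_unir_tiempos : Prop := ∀ (marcas : List (List Int)) (i : Int), Dom_unir_tiempos marcas i → Pre_unir_tiempos marcas i → Spec_unir_tiempos marcas i (unir_tiempos marcas i)

-- ===== LEMMAS AND PROOFS =====

lemma pvJoin_nil : PySem.Str.join "" ([] : List String) = "" := by
  apply String.toList_injective
  simp [PySem.Str.toList_join, PySem.Chars.join_nil]

-- ''.join with empty separator peels off the head string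
lemma pvJoin_empty_cons (a : String) (l : List String) :
    PySem.Str.join "" (a :: l) = a ++ PySem.Str.join "" l := by
  apply String.toList_injective
  simp only [PySem.Str.toList_join, List.map_cons, String.toList_append]
  cases l with
  | nil => simp [PySem.Chars.join_singleton, PySem.Chars.join_nil]
  | cons b t => simp [PySem.Chars.join_cons_cons]

lemma pvStr_append_assoc (a b c : String) : a ++ b ++ c = a ++ (b ++ c) := by
  apply String.toList_injective; simp

-- one unfolding of A, for an in-range index, is pvRow of the indexed row
lemma unir_tiempos_step (marcas : List (List Int)) (i : Int)
    (hne : marcas ≠ []) (hlt : i < (marcas.length : Int)) :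
    unir_tiempos marcas i =
      pvRow ((PySem.List.pyGet? marcas i).getD []) ++ unir_tiempos marcas (i + 1) := by
  rw [unir_tiempos]
  rw [if_neg hne, if_neg (by simp only [PySem.List.len_eq]; omega)]
  rw [pvRow, pvPad, pvPad, pvPad, pvStr_append_assoc]

-- one unfolding of B peels the head of the range off the join
lemma unir_tiempos_alt_step (marcas : List (List Int)) (i : Int)
    (hne : marcas ≠ []) (hlt : i < (marcas.length : Int)) :
    unir_tiempos_alt marcas i =
      pvRow ((PySem.List.pyGet? marcas i).getD []) ++ unir_tiempos_alt marcas (i + 1) := by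
  rw [unir_tiempos_alt, unir_tiempos_alt, if_neg hne, if_neg hne]
  rw [show PySem.List.len marcas = (marcas.length : Int) from PySem.List.len_eq marcas]
  rw [PySem.List.pyRange_one_cons hlt, List.map_cons, pvJoin_empty_cons]

-- past the end both are empty
lemma unir_tiempos_past (marcas : List (List Int)) (i : Int) (hne : marcas ≠ [])
    (hge : (marcas.length : Int) ≤ i) :
    unir_tiempos marcas i = "" ∧ unir_tiempos_alt marcas i = "" := by
  constructor
  · rw [unir_tiempos, if_neg hne, if_pos (by simp only [PySem.List.len_eq]; omega)]
  · rw [unir_tiempos_alt, if_neg hne,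
        show PySem.List.len marcas = (marcas.length : Int) from PySem.List.len_eq marcas]
    rw [show PySem.List.pyRange i (marcas.length : Int) = [] by
          simp [PySem.List.pyRange]; omega]
    simp only [List.map_nil]
    exact pvJoin_nil

-- the two ports agree index by index, by fuel on the remaining positions
lemma unir_tiempos_eq_alt (marcas : List (List Int)) (hne : marcas ≠ []) :
    ∀ (n : Nat) (i : Int), ((marcas.length : Int) - i).toNat ≤ n →
      unir_tiempos marcas i = unir_tiempos_alt marcas i := by
  intro n
  induction n with
  | zero =>
    intro i h
    have hge : (marcas.length : Int) ≤ i := by omega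
    rw [(unir_tiempos_past marcas i hne hge).1, (unir_tiempos_past marcas i hne hge).2]
  | succ n ih =>
    intro i h
    by_cases hlt : i < (marcas.length : Int)
    · rw [unir_tiempos_step marcas i hne hlt, unir_tiempos_alt_step marcas i hne hlt,
          ih (i + 1) (by omega)]
    · push Not at hlt
      rw [(unir_tiempos_past marcas i hne hlt).1, (unir_tiempos_past marcas i hne hlt).2]

-- ===== VERDICT =====
theorem unir_tiempos_spec : Claim_equal_unir_tiempos := by
  intro marcas i _ _
  show unir_tiempos marcas i = unir_tiempos_alt marcas i
  by_cases hne : marcas = []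
  · subst hne
    rw [unir_tiempos, if_pos rfl, unir_tiempos_alt, if_pos rfl]
  · exact unir_tiempos_eq_alt marcas hne ((marcas.length : Int) - i).toNat i le_rfl
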